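-- pv_equiv track=rewrite | github.com/summer-intern-code/Traditional-trading-strategy | findp.py | cashcal
-- ===== SOURCE A (Python) =====
-- def cashcal(close,xamount):
--     cash=0
--     tolist=[]
--     cashlist=[]
--     po=[]
--     for i in range(len(close)):
--           cashlist.append(cash)
--           positionx=sum(xamount[0:i+1])
--
--           if xamount[i]!=0:
--              cash=cash-xamount[i]*close[i]#-0.0005(abs(xamount[i]*x[i])+abs(yamount[i]*y[i]))
--           total=cash+positionx*close[i]
--           tolist.append(total)
--           po.append(positionx)
--     return tolist,cashlist,po
-- ===== SOURCE B (Python) =====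
-- def cashcal(close, xamount):
--     # Single pass with running position (prefix sum) and cash; O(n) instead of A's O(n^2).
--     cash = 0
--     pos = 0
--     tolist = []
--     cashlist = []
--     po = []
--     for c, a in zip(close, xamount):
--         cashlist.append(cash)
--         pos += a
--         cash -= a * c
--         tolist.append(cash + pos * c)
--         po.append(pos)
--     return tolist, cashlist, po
-- ===== Notes on version B (the rewrite author's own statement) =====
-- stated objective: faster
-- what changed: B keeps a running prefix sum of xamount (and folds the no-op 'if amount != 0' guard into an unconditional update) in one zip pass, instead of re-summing xamount[0:i+1] at every index.
import Mathlib
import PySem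

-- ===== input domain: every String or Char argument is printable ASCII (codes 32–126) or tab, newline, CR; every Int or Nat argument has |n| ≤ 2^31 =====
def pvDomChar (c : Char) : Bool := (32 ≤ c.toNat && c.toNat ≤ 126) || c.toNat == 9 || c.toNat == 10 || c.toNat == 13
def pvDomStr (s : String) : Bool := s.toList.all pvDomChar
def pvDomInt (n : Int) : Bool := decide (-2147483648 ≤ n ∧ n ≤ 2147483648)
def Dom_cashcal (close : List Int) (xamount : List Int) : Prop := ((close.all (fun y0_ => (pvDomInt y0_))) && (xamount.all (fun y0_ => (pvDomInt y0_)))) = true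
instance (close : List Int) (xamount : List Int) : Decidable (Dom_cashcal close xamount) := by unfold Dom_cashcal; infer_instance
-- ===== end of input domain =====

-- B replaces A's per-index re-summing of xamount[0:i+1] by a running prefix sum in one zip pass (faster, O(n) vs O(n^2)).
-- ===== PORT A =====
-- loop body of A: state (cash, tolist, cashlist, po), index i
def stepA (close : List Int) (xamount : List Int)
    (s : Int × List Int × List Int × List Int) (i : Int) :
    Int × List Int × List Int × List Int :=
  let cash := s.1
  let cashlist := s.2.2.1 ++ [cash]
  let positionx := (PySem.List.slice xamount (some 0) (some (i + 1))).sum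
  let cash := if PySem.List.pyGetD xamount i 0 ≠ 0
    then cash - PySem.List.pyGetD xamount i 0 * PySem.List.pyGetD close i 0
    else cash
  let total := cash + positionx * PySem.List.pyGetD close i 0
  (cash, s.2.1 ++ [total], cashlist, s.2.2.2 ++ [positionx])

def cashcal (close : List Int) (xamount : List Int) : List (List Int) :=
  let st := (PySem.List.pyRange 0 (close.length : Int) 1).foldl (stepA close xamount) (0, [], [], [])
  [st.2.1, st.2.2.1, st.2.2.2]

-- ===== PORT B =====
-- loop body of B: state (cash, pos, tolist, cashlist, po), element (c, a) of zip(close, xamount)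
def stepB (s : Int × Int × List Int × List Int × List Int) (p : Int × Int) :
    Int × Int × List Int × List Int × List Int :=
  let cash := s.1
  let cashlist := s.2.2.2.1 ++ [cash]
  let pos := s.2.1 + p.2
  let cash := cash - p.2 * p.1
  (cash, pos, s.2.2.1 ++ [cash + pos * p.1], cashlist, s.2.2.2.2 ++ [pos])

def cashcal_alt (close : List Int) (xamount : List Int) : List (List Int) :=
  let st := (close.zip xamount).foldl stepB (0, 0, [], [], [])
  [st.2.2.1, st.2.2.2.1, st.2.2.2.2]

-- ===== PRECONDITION & SPEC =====
-- Pre_ excludes only inputs where A raises IndexError (xamount[i] when close is longer than xamount); A returns on every input Pre_ admits.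
def Pre_cashcal (close : List Int) (xamount : List Int) : Prop := close.length ≤ xamount.length
instance (close : List Int) (xamount : List Int) : Decidable (Pre_cashcal close xamount) := by unfold Pre_cashcal; infer_instance
def pvWitness_cashcal : List Int × List Int := ([2, 3], [1, -1])

def Spec_cashcal (close : List Int) (xamount : List Int) (out : List (List Int)) : Prop := out = cashcal_alt close xamount
instance (close : List Int) (xamount : List Int) (out : List (List Int)) : Decidable (Spec_cashcal close xamount out) := by unfold Spec_cashcal; infer_instance

-- ===== CLAIM (what is proved, stated in full; the proofs are below) =====
def Claim_equal_cashcal : Prop := ∀ (close : List Int) (xamount : List Int), Dom_cashcal close xamount → Pre_cashcal close xamount → Spec_cashcal close xamount (cashcal close xamount)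
-- ===== LEMMAS AND PROOFS =====
-- projection of B's loop state onto A's (drop the running position)
def dropPos (s : Int × Int × List Int × List Int × List Int) : Int × List Int × List Int × List Int :=
  (s.1, s.2.2.1, s.2.2.2.1, s.2.2.2.2)

lemma loop_eq (close xamount : List Int) (h : close.length ≤ xamount.length) :
    ∀ (k j : ℕ), j + k = close.length → ∀ (cash : Int) (t cl po : List Int),
    (PySem.List.pyRange (j : Int) (close.length : Int) 1).foldl (stepA close xamount) (cash, t, cl, po)
      = dropPos (((close.drop j).zip (xamount.drop j)).foldl stepB
          (cash, (xamount.take j).sum, t, cl, po)) := by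
  intro k
  induction k with
  | zero =>
    intro j hj cash t cl po
    have hd : close.drop j = [] := List.drop_eq_nil_of_le (by omega)
    rw [PySem.List.pyRange_one_eq_nil (by exact_mod_cast Nat.le_of_eq (by omega))]
    simp [hd, dropPos]
  | succ k ih =>
    intro j hj cash t cl po
    have hjc : j < close.length := by omega
    have hjx : j < xamount.length := by omega
    rw [PySem.List.pyRange_one_cons (by exact_mod_cast hjc)]
    rw [List.drop_eq_getElem_cons hjc, List.drop_eq_getElem_cons hjx]
    simp only [List.foldl_cons, List.zip_cons_cons]
    have hsum : (xamount.take (j + 1)).sum = (xamount.take j).sum + xamount[j] :=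
      List.sum_take_succ xamount j hjx
    have hA : stepA close xamount (cash, t, cl, po) (j : Int)
        = (cash - xamount[j] * close[j],
           t ++ [cash - xamount[j] * close[j] + ((xamount.take j).sum + xamount[j]) * close[j]],
           cl ++ [cash],
           po ++ [(xamount.take j).sum + xamount[j]]) := by
      have hcast : ((j : Int) + 1) = (((j + 1 : ℕ) : Int)) := by push_cast; ring
      simp only [stepA, hcast, PySem.List.slice_zero_start, PySem.List.slice_to_natCast,
        PySem.List.pyGetD_natCast, hsum]
      rw [List.getD_eq_getElem _ _ hjx, List.getD_eq_getElem _ _ hjc]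
      split_ifs with hz
      · rfl
      · rw [not_not] at hz
        rw [hz]; norm_num
    have hB : stepB (cash, (xamount.take j).sum, t, cl, po) (close[j], xamount[j])
        = (cash - xamount[j] * close[j],
           (xamount.take j).sum + xamount[j],
           t ++ [cash - xamount[j] * close[j] + ((xamount.take j).sum + xamount[j]) * close[j]],
           cl ++ [cash],
           po ++ [(xamount.take j).sum + xamount[j]]) := rfl
    rw [hA, hB]
    have hcast : ((j : Int) + 1) = (((j + 1 : ℕ) : Int)) := by push_cast; ring
    rw [hcast, ih (j + 1) (by omega)]
    rw [hsum]

-- ===== VERDICT (by name: the statement is the Claim_ definition above) =====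
theorem cashcal_spec : Claim_equal_cashcal := by
  intro close xamount _ hpre
  unfold Spec_cashcal cashcal cashcal_alt
  have h := loop_eq close xamount hpre close.length 0 (by omega) 0 [] [] []
  simp only [Nat.cast_zero, List.drop_zero, List.take_zero, List.sum_nil] at h
  rw [h]
  rfl
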